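-- pv_equiv track=rewrite | github.com/MarkoVasilic/BraniacProject | src/feature_extractor.py | calculate_bin_array
-- ===== SOURCE A (Python) =====
-- from typing import List, Tuple
--
-- def calculate_bin_array(one_feature_list: List[str], all_features_lists: List[str]) -> List[int]:
--     """
--     Calculate a binary array based on the presence of elements in the input list.
--
--     Args:
--         one_feature_list (list): Input list.
--         all_features_lists (list): List of all possible features.
--
--     Returns:
--         list: Binary array indicating the presence of elements in the input list.
--     """
--     bin_list = []
--     for element in all_features_lists:
--         if element in one_feature_list:
--             bin_list.append(1)
--         else:
--             bin_list.append(0)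
--     return bin_list
-- ===== SOURCE B (Python) =====
-- def calculate_bin_array(one_feature_list, all_features_lists):
--     # positional index: vocabulary element -> all positions where it occurs
--     positions = {}
--     for i, element in enumerate(all_features_lists):
--         positions.setdefault(element, []).append(i)
--     result = [0] * len(all_features_lists)
--     for element in one_feature_list:
--         for i in positions.get(element, []):
--             result[i] = 1
--     return result
-- ===== Notes on version B (the rewrite author's own statement) =====
-- stated objective: faster
-- what changed: Instead of testing membership of each vocabulary element in one_feature_list (a linear scan per slot), B builds a dict from vocabulary element to all its positions once, starts from a zero array, and drives the loop over one_feature_list, setting the indexed positions to 1.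
import Mathlib
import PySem

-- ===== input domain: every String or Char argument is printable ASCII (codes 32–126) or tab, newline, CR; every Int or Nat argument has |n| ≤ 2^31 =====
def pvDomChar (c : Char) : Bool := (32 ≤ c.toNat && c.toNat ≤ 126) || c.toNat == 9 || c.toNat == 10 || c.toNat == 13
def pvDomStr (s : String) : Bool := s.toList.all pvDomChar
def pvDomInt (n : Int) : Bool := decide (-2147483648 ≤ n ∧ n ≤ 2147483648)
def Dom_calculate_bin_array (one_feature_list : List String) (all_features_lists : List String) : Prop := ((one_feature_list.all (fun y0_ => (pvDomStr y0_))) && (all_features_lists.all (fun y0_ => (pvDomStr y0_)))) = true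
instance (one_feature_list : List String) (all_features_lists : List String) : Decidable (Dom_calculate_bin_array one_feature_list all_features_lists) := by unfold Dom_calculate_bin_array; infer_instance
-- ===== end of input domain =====

-- B replaces A's per-vocabulary-slot membership scan by a prebuilt position index and a
-- marking pass over one_feature_list (objective: faster).

-- ===== PORT A =====
-- for element in all_features_lists: bin_list.append(1 if element in one_feature_list else 0)
def calculate_bin_array (one_feature_list : List String) (all_features_lists : List String) : List Int :=
  all_features_lists.foldl
    (fun bin_list element => bin_list ++ [if element ∈ one_feature_list then (1 : Int) else 0]) []

-- ===== PORT B =====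
-- positions.setdefault(element, []).append(i) over enumerate(all_features_lists);
-- setdefault-then-append is ported as Dict.modify element [] (· ++ [i]); the Int index from
-- enumerate is stored via .toNat (exact: enumerate indices are ≥ 0).
def pvPositions (all_features_lists : List String) : PySem.Dict String (List Nat) :=
  (PySem.List.enumerate all_features_lists).foldl
    (fun d p => d.modify p.2 [] (fun l => l ++ [p.1.toNat])) PySem.Dict.empty

-- for i in positions.get(element, []): result[i] = 1   (result[i] = 1 ported as List.set; every
-- stored index is in range, where List.set is exactly Python's assignment)
def pvMark (result : List Int) (idxs : List Nat) : List Int :=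
  idxs.foldl (fun r i => r.set i 1) result

def calculate_bin_array_alt (one_feature_list : List String) (all_features_lists : List String) : List Int :=
  let positions := pvPositions all_features_lists
  one_feature_list.foldl
    (fun result element => pvMark result (positions.getD element []))
    (List.replicate all_features_lists.length 0)

-- ===== PRECONDITION & SPEC =====
def Spec_calculate_bin_array (one_feature_list : List String) (all_features_lists : List String) (out : List Int) : Prop := out = calculate_bin_array_alt one_feature_list all_features_lists
instance (one_feature_list : List String) (all_features_lists : List String) (out : List Int) : Decidable (Spec_calculate_bin_array one_feature_list all_features_lists out) := by unfold Spec_calculate_bin_array; infer_instance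

-- ===== CLAIM (what is proved, stated in full; the proofs are below) =====
def Claim_equal_calculate_bin_array : Prop := ∀ (one_feature_list : List String) (all_features_lists : List String), Dom_calculate_bin_array one_feature_list all_features_lists → Spec_calculate_bin_array one_feature_list all_features_lists (calculate_bin_array one_feature_list all_features_lists)

-- ===== LEMMAS AND PROOFS =====

-- A is the membership map over the vocabulary.
theorem calcA_eq_map (o a : List String) :
    calculate_bin_array o a = a.map (fun e => if e ∈ o then (1 : Int) else 0) := by
  simpa [calculate_bin_array] using
    PySem.List.foldl_append_singleton_eq_map (fun e => if e ∈ o then (1 : Int) else 0) a []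

-- The index build, with a generalized accumulator.
theorem positions_foldl (ps : List (Int × String)) (d : PySem.Dict String (List Nat)) (e : String) :
    (ps.foldl (fun d p => d.modify p.2 [] (fun l => l ++ [p.1.toNat])) d).getD e []
      = d.getD e [] ++ (ps.filter (fun p => p.2 = e)).map (·.1.toNat) := by
  induction ps generalizing d with
  | nil => simp
  | cons p ps ih =>
    simp only [List.foldl_cons, ih, List.filter_cons]
    rw [PySem.Dict.getD_modify]
    by_cases h : p.2 = e
    · simp [h]
    · simp [h, Ne.symm h]

-- Which indices the dict stores under e: exactly the positions of e in the vocabulary.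
theorem mem_positions (a : List String) (e : String) (j : Nat) :
    j ∈ (pvPositions a).getD e [] ↔ a[j]? = some e := by
  rw [pvPositions, positions_foldl]
  simp only [PySem.Dict.getD_empty, List.nil_append, List.mem_map, List.mem_filter]
  constructor
  · rintro ⟨⟨i, x⟩, ⟨hm, hx⟩, rfl⟩
    obtain ⟨k, hk, heq⟩ := (PySem.List.mem_enumerate_iff a 0 (i, x)).mp hm
    simp only [Prod.mk.injEq, zero_add] at heq
    obtain ⟨rfl, rfl⟩ := heq
    simp only [decide_eq_true_eq] at hx
    simp [hx, List.getElem?_eq_getElem hk]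
  · intro h
    obtain ⟨hj, hje⟩ := List.getElem?_eq_some_iff.mp h
    refine ⟨((j : Int), e), ⟨(PySem.List.mem_enumerate_iff a 0 _).mpr ⟨j, hj, by simp [hje]⟩, by simp⟩, by simp⟩

theorem mark_length (r : List Int) (idxs : List Nat) : (pvMark r idxs).length = r.length := by
  induction idxs generalizing r with
  | nil => rfl
  | cons i idxs ih => simp [pvMark, List.foldl_cons] at *; rw [ih, List.length_set]

theorem mark_getElem? (r : List Int) (idxs : List Nat) (j : Nat)
    (hin : ∀ i ∈ idxs, i < r.length) :
    (pvMark r idxs)[j]? = if j ∈ idxs then some 1 else r[j]? := by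
  induction idxs generalizing r with
  | nil => simp [pvMark]
  | cons i idxs ih =>
    have hlen : ∀ k ∈ idxs, k < (r.set i 1).length := by
      intro k hk; rw [List.length_set]; exact hin k (List.mem_cons_of_mem _ hk)
    have : pvMark r (i :: idxs) = pvMark (r.set i 1) idxs := rfl
    rw [this, ih _ hlen]
    by_cases hj : j ∈ idxs
    · simp [hj]
    · by_cases hji : j = i
      · subst hji
        simp [hj, List.getElem?_set_self (hin j (List.mem_cons_self))]
      · simp [hj, hji, List.getElem?_set_ne (Ne.symm hji)]

-- The marking loop over one_feature_list, with a generalized result array.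
theorem mark_loop_getElem? (o a : List String) (r : List Int) (hr : r.length = a.length) (j : Nat) :
    (o.foldl (fun result element => pvMark result ((pvPositions a).getD element []) ) r)[j]?
      = if ∃ e ∈ o, a[j]? = some e then some 1 else r[j]? := by
  induction o generalizing r with
  | nil => simp
  | cons e o ih =>
    have hin : ∀ i ∈ (pvPositions a).getD e [], i < r.length := by
      intro i hi
      rw [hr]
      exact (List.getElem?_eq_some_iff.mp ((mem_positions a e i).mp hi)).1
    rw [List.foldl_cons, ih _ ((mark_length r _).trans hr)]
    rw [mark_getElem? r _ j hin]
    simp only [mem_positions]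
    by_cases h1 : ∃ x ∈ o, a[j]? = some x
    · simp [h1]
    · by_cases h2 : a[j]? = some e
      · simp [h1]
      · have : ¬ ∃ x ∈ e :: o, a[j]? = some x := by
          rintro ⟨x, hx, hax⟩
          rcases List.mem_cons.mp hx with rfl | hx
          · exact h2 hax
          · exact h1 ⟨x, hx, hax⟩
        simp [h1, h2]

-- ===== VERDICT (by name: the statement is the Claim_ definition above) =====
theorem calculate_bin_array_spec : Claim_equal_calculate_bin_array := by
  intro o a _
  show calculate_bin_array o a = calculate_bin_array_alt o a
  rw [calcA_eq_map]
  apply List.ext_getElem?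
  intro j
  rw [calculate_bin_array_alt]
  rw [mark_loop_getElem? o a _ (by simp) j]
  by_cases hj : j < a.length
  · have ha : a[j]? = some a[j] := List.getElem?_eq_getElem hj
    by_cases hm : a[j] ∈ o
    · have : ∃ e ∈ o, a[j]? = some e := ⟨a[j], hm, ha⟩
      simp [ha, hm]
    · have : ¬ ∃ e ∈ o, a[j]? = some e := by
        rintro ⟨e, he, hae⟩
        rw [ha] at hae; injection hae with h; subst h; exact hm he
      simp [hj, hm]
  · have ha : a[j]? = none := List.getElem?_eq_none_iff.mpr (le_of_not_gt hj)
    have : ¬ ∃ e ∈ o, a[j]? = some e := by rintro ⟨e, _, hae⟩; rw [ha] at hae; cases hae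
    simp [hj]
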